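-- pv_equiv track=rewrite | github.com/fkie-cad/Logprep | logprep/processor/pseudonymizer/processor.py | _get_parts_to_replace_in_correct_order
-- ===== SOURCE A (Python) =====
-- from typing import Any, List, Optional, Pattern, Tuple, Union
--
-- def _get_parts_to_replace_in_correct_order(pseudonym_map: dict) -> List[str]:
--     replacements = []
--     keys = list(pseudonym_map.keys())
--     for key in keys:
--         if not replacements:
--             replacements.append(key)
--         else:
--             for index in reversed(range(len(replacements))):
--                 if not any(key in replacement for replacement in replacements[:index]):
--                     replacements.insert(index + 1, key)
--                     break
--     replacements.reverse()
--     return replacements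
-- ===== SOURCE B (Python) =====
-- from typing import List
--
-- def _get_parts_to_replace_in_correct_order(pseudonym_map: dict) -> List[str]:
--     replacements = []
--     for key in pseudonym_map:
--         for pos, replacement in enumerate(replacements):
--             if key in replacement:
--                 replacements.insert(pos + 1, key)
--                 break
--         else:
--             replacements.append(key)
--     replacements.reverse()
--     return replacements
-- ===== Notes on version B (the rewrite author's own statement) =====
-- stated objective: alternative
-- what changed: A scans candidate indices from the back of the list and for each index re-tests substring containment over the whole prefix via any(); B does one forward scan per key, inserting it directly after the first replacement that contains it (appending if none does).
import Mathlib
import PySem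

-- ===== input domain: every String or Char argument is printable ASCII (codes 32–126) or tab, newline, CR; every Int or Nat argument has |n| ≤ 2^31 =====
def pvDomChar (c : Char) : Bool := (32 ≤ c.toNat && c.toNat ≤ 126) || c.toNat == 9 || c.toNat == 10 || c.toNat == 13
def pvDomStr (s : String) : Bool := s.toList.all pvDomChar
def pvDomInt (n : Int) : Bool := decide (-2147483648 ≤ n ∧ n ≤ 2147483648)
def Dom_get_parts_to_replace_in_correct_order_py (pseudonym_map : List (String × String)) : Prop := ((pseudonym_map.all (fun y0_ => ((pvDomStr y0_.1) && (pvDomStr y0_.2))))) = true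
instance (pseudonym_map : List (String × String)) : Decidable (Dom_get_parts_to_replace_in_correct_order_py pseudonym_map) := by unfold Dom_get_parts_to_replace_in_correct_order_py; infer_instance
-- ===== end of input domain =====

-- B replaces A's backward scan over all prefixes (an any() over replacements[:index] for each index)
-- by a single forward scan that inserts the key right after the first replacement containing it
-- (appending if none does); objective: alternative (worst case improves, measured parity on random data).

-- ===== PORT A =====
-- inner loop: `for index in reversed(range(len(replacements))): if not any(...): insert(index+1, key); break`
def pvAFind (key : String) (replacements : List String) : List Int → List String
  | [] => replacements
  | i :: rest =>
    if !((PySem.List.slice replacements none (some i)).any (fun replacement => PySem.Str.isIn key replacement)) then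
      PySem.List.insert replacements (i + 1) key
    else pvAFind key replacements rest

def get_parts_to_replace_in_correct_order_py (pseudonym_map : List (String × String)) : List String :=
  (((PySem.Dict.ofList pseudonym_map).keys).foldl
    (fun replacements key =>
      if replacements.isEmpty then replacements ++ [key]
      else pvAFind key replacements ((PySem.List.pyRange 0 (replacements.length : Int) 1).reverse))
    []).reverse

-- ===== PORT B =====
-- single forward scan: insert key right after the first replacement that contains it, else append
def pvBInsert (key : String) : List String → List String
  | [] => [key]
  | r :: rest => if PySem.Str.isIn key r then r :: key :: rest else r :: pvBInsert key rest

def get_parts_to_replace_in_correct_order_py_alt (pseudonym_map : List (String × String)) : List String :=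
  (((PySem.Dict.ofList pseudonym_map).keys).foldl
    (fun replacements key => pvBInsert key replacements) []).reverse

-- ===== PRECONDITION & SPEC =====
def Spec_get_parts_to_replace_in_correct_order_py (pseudonym_map : List (String × String)) (out : List String) : Prop := out = get_parts_to_replace_in_correct_order_py_alt pseudonym_map
instance (pseudonym_map : List (String × String)) (out : List String) : Decidable (Spec_get_parts_to_replace_in_correct_order_py pseudonym_map out) := by unfold Spec_get_parts_to_replace_in_correct_order_py; infer_instance

-- ===== CLAIM (what is proved, stated in full; the proofs are below) =====
def Claim_equal_get_parts_to_replace_in_correct_order_py : Prop := ∀ (pseudonym_map : List (String × String)), Dom_get_parts_to_replace_in_correct_order_py pseudonym_map → Spec_get_parts_to_replace_in_correct_order_py pseudonym_map (get_parts_to_replace_in_correct_order_py pseudonym_map)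

-- ===== LEMMAS AND PROOFS =====

-- Python list.insert at a nonnegative index k is take/cons/drop (clamping agrees for k > len)
theorem pv_ins_nat (xs : List String) (k : Nat) (v : String) :
    PySem.List.insert xs (k : Int) v = xs.take k ++ v :: xs.drop k := by
  simp only [PySem.List.insert, PySem.List.sliceIndices]
  norm_num
  rw [if_neg (by omega)]
  have h : (min (k:Int) (xs.length:Int)).toNat = min k xs.length := by omega
  rw [h, min_def]
  split_ifs with hk
  · rfl
  · rw [List.take_of_length_le (le_refl _), List.take_of_length_le (by omega),
        List.drop_of_length_le (le_refl _), List.drop_of_length_le (by omega)]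

theorem pv_findIdx?_take {α : Type} (p : α → Bool) (l : List α) (k : Nat) :
    (l.take k).findIdx? p =
      (match l.findIdx? p with
       | some j => if j < k then some j else none
       | none => none) := by
  induction l generalizing k with
  | nil => simp
  | cons a t ih =>
    cases k with
    | zero =>
      simp only [List.take_zero, List.findIdx?_nil, List.findIdx?_cons]
      by_cases hpa : p a <;> simp [hpa] <;> cases t.findIdx? p <;> simp
    | succ k =>
      simp only [List.take_succ_cons, List.findIdx?_cons]
      by_cases hpa : p a
      · simp [hpa]
      · simp only [hpa, cond_false, ih]
        cases t.findIdx? p with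
        | none => simp
        | some j =>
          by_cases hj : j < k <;> simp [hj, Nat.succ_lt_succ_iff]

theorem pv_any_eq_isSome {α : Type} (p : α → Bool) (l : List α) :
    l.any p = (l.findIdx? p).isSome := by
  induction l with
  | nil => simp
  | cons a t ih =>
    simp only [List.any_cons, List.findIdx?_cons]
    by_cases hpa : p a
    · simp [hpa]
    · simp only [hpa, Bool.false_or, cond_false, ih]
      cases t.findIdx? p <;> simp

-- the target index as a function of the first containing position
def pvIdx (j? : Option Nat) (k : Nat) : Nat :=
  match j? with
  | some j => min (j + 1) k
  | none => k

theorem pvBInsert_eq (key : String) (reps : List String) :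
    pvBInsert key reps =
      (match reps.findIdx? (fun r => PySem.Str.isIn key r) with
       | some j => reps.take (j + 1) ++ key :: reps.drop (j + 1)
       | none => reps ++ [key]) := by
  induction reps with
  | nil => simp [pvBInsert]
  | cons r t ih =>
    simp only [pvBInsert, List.findIdx?_cons, PySem.Str.isIn_eq] at ih ⊢
    by_cases h : PySem.Chars.isIn key.toList r.toList
    · simp [h]
    · simp only [h, ih, Bool.false_eq_true, if_false, cond_false]
      cases t.findIdx? (fun r => PySem.Chars.isIn key.toList r.toList) <;> simp

theorem pvAFind_run (key : String) (reps : List String) :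
    ∀ k : Nat, 1 ≤ k →
      pvAFind key reps ((List.range k).map (fun n : Nat => (n : Int))).reverse =
        reps.take (pvIdx (reps.findIdx? (fun r => PySem.Str.isIn key r)) k) ++
          key :: reps.drop (pvIdx (reps.findIdx? (fun r => PySem.Str.isIn key r)) k) := by
  intro k
  induction k with
  | zero => omega
  | succ k ih =>
    intro _
    rw [List.range_succ, List.map_append, List.reverse_append, List.map_singleton,
        List.reverse_singleton, List.singleton_append]
    show (if !((PySem.List.slice reps none (some ((k : Nat) : Int))).any
            (fun replacement => PySem.Str.isIn key replacement)) then
          PySem.List.insert reps (((k : Nat) : Int) + 1) key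
        else pvAFind key reps ((List.range k).map (fun n : Nat => (n : Int))).reverse) = _
    rw [PySem.List.slice_to_natCast reps k]
    by_cases hany : (reps.take k).any (fun replacement => PySem.Str.isIn key replacement)
    · rw [hany]
      simp only [Bool.not_true, Bool.false_eq_true, if_false]
      have hk1 : 1 ≤ k := by
        by_contra hk0
        have : k = 0 := by omega
        subst this
        simp at hany
      rw [ih hk1]
      have hsome : ((reps.take k).findIdx? (fun r => PySem.Str.isIn key r)).isSome := by
        rw [← pv_any_eq_isSome]; exact hany
      rw [pv_findIdx?_take] at hsome
      rcases hj : reps.findIdx? (fun r => PySem.Str.isIn key r) with _ | j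
      · rw [hj] at hsome; simp at hsome
      · rw [hj] at hsome
        by_cases hjk : j < k
        · simp only [pvIdx]
          rw [min_eq_left (by omega), min_eq_left (by omega)]
        · simp [hjk] at hsome
    · rw [Bool.not_eq_true] at hany
      rw [hany]
      simp only [Bool.not_false, if_true]
      rw [show (((k : Nat) : Int) + 1) = (((k + 1 : Nat)) : Int) by push_cast; ring]
      rw [pv_ins_nat reps (k + 1) key]
      have hnone : (reps.take k).findIdx? (fun r => PySem.Str.isIn key r) = none := by
        have h2 := pv_any_eq_isSome (fun r => PySem.Str.isIn key r) (reps.take k)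
        rw [hany] at h2
        exact Option.not_isSome_iff_eq_none.mp (by rw [← h2]; exact Bool.false_ne_true)
      rw [pv_findIdx?_take] at hnone
      rcases hj : reps.findIdx? (fun r => PySem.Str.isIn key r) with _ | j
      · rfl
      · rw [hj] at hnone
        by_cases hjk : j < k
        · simp [hjk] at hnone
        · simp only [pvIdx]
          rw [min_eq_right (by omega)]

theorem pv_step_eq (reps : List String) (key : String) :
    (if reps.isEmpty then reps ++ [key]
     else pvAFind key reps ((PySem.List.pyRange 0 (reps.length : Int) 1).reverse)) =
      pvBInsert key reps := by
  cases reps with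
  | nil => rfl
  | cons r t =>
    rw [if_neg (by simp)]
    rw [PySem.List.pyRange_zero_natCast]
    rw [pvAFind_run key (r :: t) (r :: t).length (by simp)]
    rw [pvBInsert_eq]
    rcases hj : (r :: t).findIdx? (fun s => PySem.Str.isIn key s) with _ | j
    · simp only [pvIdx, List.take_length, List.drop_length]
    · have hjlt : j < (r :: t).length := by
        have := List.findIdx?_eq_some_iff_findIdx_eq.mp hj
        omega
      simp only [pvIdx]
      rw [min_eq_left (by omega)]

-- ===== VERDICT (by name: the statement is the Claim_ definition above) =====
theorem get_parts_to_replace_in_correct_order_py_spec : Claim_equal_get_parts_to_replace_in_correct_order_py := by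
  intro m _
  unfold Spec_get_parts_to_replace_in_correct_order_py
  unfold get_parts_to_replace_in_correct_order_py get_parts_to_replace_in_correct_order_py_alt
  have hf : (fun (replacements : List String) (key : String) =>
      if replacements.isEmpty then replacements ++ [key]
      else pvAFind key replacements ((PySem.List.pyRange 0 (replacements.length : Int) 1).reverse)) =
      (fun replacements key => pvBInsert key replacements) := by
    funext reps key
    exact pv_step_eq reps key
  rw [hf]
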